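-- pv_equiv track=rewrite | github.com/aaronnech/GameCapstone | plots/util.py | lastEventByUser
-- ===== SOURCE A (Python) =====
-- def lastEventByUser(rows):
-- 	eventNum = {}
-- 	result = {}
-- 	for s in rows:
-- 		evt_name = s[3]
-- 		evt_number = s[4]
-- 		uid = s[2]
--
-- 		if uid not in result:
-- 			eventNum[uid] = evt_number
-- 			result[uid] = evt_name
-- 		elif evt_number > eventNum[uid]:
-- 			eventNum[uid] = evt_number
-- 			result[uid] = evt_name
--
-- 	return result
-- ===== SOURCE B (Python) =====
-- def lastEventByUser(rows):
-- 	groups = {}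
-- 	for s in rows:
-- 		groups.setdefault(s[2], []).append(s)
-- 	return {uid: max(g, key=lambda s: s[4])[3] for uid, g in groups.items()}
-- ===== Notes on version B (the rewrite author's own statement) =====
-- stated objective: simpler
-- what changed: Replaces A's single-pass online running-max maintained in two parallel dicts (eventNum and result) with a two-phase decomposition: one pass grouping rows by uid into a dict of lists, then a per-group max(key=s[4]) whose first-maximal rule reproduces A's strict-'>' tie-breaking.
import Mathlib
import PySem

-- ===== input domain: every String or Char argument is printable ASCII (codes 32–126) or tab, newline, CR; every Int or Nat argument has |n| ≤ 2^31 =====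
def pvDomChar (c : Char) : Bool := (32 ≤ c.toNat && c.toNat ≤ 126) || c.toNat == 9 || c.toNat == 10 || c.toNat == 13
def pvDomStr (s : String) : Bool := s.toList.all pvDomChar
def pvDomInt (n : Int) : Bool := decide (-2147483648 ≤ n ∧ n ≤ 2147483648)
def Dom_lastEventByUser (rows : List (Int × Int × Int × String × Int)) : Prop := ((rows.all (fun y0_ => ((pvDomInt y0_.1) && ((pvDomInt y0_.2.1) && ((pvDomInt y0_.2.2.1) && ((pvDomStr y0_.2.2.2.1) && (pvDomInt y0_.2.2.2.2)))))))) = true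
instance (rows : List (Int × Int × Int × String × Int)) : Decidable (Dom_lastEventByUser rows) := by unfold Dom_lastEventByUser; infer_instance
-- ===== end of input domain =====

-- B replaces A's online running-max over two parallel dicts with a build-groups-then-reduce
-- decomposition (group rows by uid, then take the first maximal row per group); objective: simpler.

abbrev PVRow : Type := Int × Int × Int × String × Int

-- ===== PORT A =====
-- one loop iteration of A (st = (eventNum, result); the `none` arm of the match is unreachable
-- from the empty start state: uid ∈ result implies uid ∈ eventNum, so Python's eventNum[uid]
-- cannot raise KeyError there)
def pvStepA (st : PySem.Dict Int Int × PySem.Dict Int String) (s : PVRow) :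
    PySem.Dict Int Int × PySem.Dict Int String :=
  let evt_name := s.2.2.2.1
  let evt_number := s.2.2.2.2
  let uid := s.2.2.1
  if st.2.contains uid = false then
    (st.1.insert uid evt_number, st.2.insert uid evt_name)
  else
    match st.1.get? uid with
    | some m => if evt_number > m then (st.1.insert uid evt_number, st.2.insert uid evt_name) else st
    | none => st

def lastEventByUser (rows : List PVRow) : List (Int × String) :=
  (rows.foldl pvStepA (PySem.Dict.empty, PySem.Dict.empty)).2.items

-- ===== PORT B =====
-- max(g, key=lambda s: s[4]) on a nonempty g: Python's max keeps the FIRST maximal element (strict >)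
def pvMaxB (b : PVRow) (l : List PVRow) : PVRow :=
  l.foldl (fun b s => if s.2.2.2.2 > b.2.2.2.2 then s else b) b

def lastEventByUser_alt (rows : List PVRow) : List (Int × String) :=
  ((rows.foldl (fun d s => d.modify s.2.2.1 [] (fun g => g ++ [s])) PySem.Dict.empty).items).map
    (fun p =>
      (p.1, match p.2 with
            | [] => ""            -- unreachable: every group is nonempty (Python's max would raise)
            | h :: t => (pvMaxB h t).2.2.2.1))

-- ===== PRECONDITION & SPEC =====
def Spec_lastEventByUser (rows : List (Int × Int × Int × String × Int)) (out : List (Int × String)) : Prop := out = lastEventByUser_alt rows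
instance (rows : List (Int × Int × Int × String × Int)) (out : List (Int × String)) : Decidable (Spec_lastEventByUser rows out) := by unfold Spec_lastEventByUser; infer_instance

-- ===== CLAIM (what is proved, stated in full; the proofs are below) =====
def Claim_equal_lastEventByUser : Prop := ∀ (rows : List (Int × Int × Int × String × Int)), Dom_lastEventByUser rows → Spec_lastEventByUser rows (lastEventByUser rows)

-- ===== LEMMAS AND PROOFS =====

-- the three branches of A's loop body, as equations
lemma pvStepA_fresh (st : PySem.Dict Int Int × PySem.Dict Int String) (s : PVRow)
    (h : st.2.contains s.2.2.1 = false) :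
    pvStepA st s = (st.1.insert s.2.2.1 s.2.2.2.2, st.2.insert s.2.2.1 s.2.2.2.1) := by
  simp [pvStepA, h]

lemma pvStepA_gt (st : PySem.Dict Int Int × PySem.Dict Int String) (s : PVRow) (m : Int)
    (h : st.2.contains s.2.2.1 = true) (hm : st.1.get? s.2.2.1 = some m) (hgt : s.2.2.2.2 > m) :
    pvStepA st s = (st.1.insert s.2.2.1 s.2.2.2.2, st.2.insert s.2.2.1 s.2.2.2.1) := by
  simp [pvStepA, h, hm, hgt]

lemma pvStepA_le (st : PySem.Dict Int Int × PySem.Dict Int String) (s : PVRow) (m : Int)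
    (h : st.2.contains s.2.2.1 = true) (hm : st.1.get? s.2.2.1 = some m) (hle : ¬ s.2.2.2.2 > m) :
    pvStepA st s = st := by
  simp [pvStepA, h, hm, hle]

-- the "first maximal row" of a list, as an Option (none on [])
def pvBestO (l : List PVRow) : Option PVRow :=
  l.foldl (fun ob s => some (match ob with
    | none => s
    | some b => if s.2.2.2.2 > b.2.2.2.2 then s else b)) none

lemma pvBestO_fold_some (t : List PVRow) : ∀ b : PVRow,
    t.foldl (fun ob s => some (match ob with
      | none => s
      | some b => if s.2.2.2.2 > b.2.2.2.2 then s else b)) (some b) = some (pvMaxB b t) := by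
  induction t with
  | nil => intro b; rfl
  | cons s t ih =>
      intro b
      simp only [List.foldl_cons, pvMaxB, ih]

lemma pvBestO_cons (h : PVRow) (t : List PVRow) : pvBestO (h :: t) = some (pvMaxB h t) := by
  simp only [pvBestO, List.foldl_cons]
  exact pvBestO_fold_some t h

lemma pvBestO_append_singleton (l : List PVRow) (s : PVRow) :
    pvBestO (l ++ [s]) = some (match pvBestO l with
      | none => s
      | some b => if s.2.2.2.2 > b.2.2.2.2 then s else b) := by
  simp only [pvBestO, List.foldl_append, List.foldl_cons, List.foldl_nil]

-- A's loop invariant: after processing `rows`, result's keys are the distinct uids in order,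
-- and both dicts hold the data of the first maximal row of each uid's rows
lemma pvA_inv (rows : List PVRow) :
    (rows.foldl pvStepA (PySem.Dict.empty, PySem.Dict.empty)).2.keys
        = PySem.Set.ofList (rows.map (·.2.2.1))
    ∧ (∀ u : Int, (rows.foldl pvStepA (PySem.Dict.empty, PySem.Dict.empty)).1.get? u
        = (pvBestO (rows.filter (fun s => s.2.2.1 == u))).map (·.2.2.2.2))
    ∧ (∀ u : Int, (rows.foldl pvStepA (PySem.Dict.empty, PySem.Dict.empty)).2.get? u
        = (pvBestO (rows.filter (fun s => s.2.2.1 == u))).map (·.2.2.2.1)) := by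
  induction rows using List.reverseRecOn with
  | nil =>
      exact ⟨rfl, fun u => rfl, fun u => rfl⟩
  | append_singleton l s ih =>
      obtain ⟨hk, hen, hres⟩ := ih
      rw [List.foldl_append]
      set st := l.foldl pvStepA (PySem.Dict.empty, PySem.Dict.empty) with hst
      simp only [List.foldl_cons, List.foldl_nil]
      have hfilt : ∀ u : Int, (l ++ [s]).filter (fun r => r.2.2.1 == u)
          = l.filter (fun r => r.2.2.1 == u) ++ (if s.2.2.1 == u then [s] else []) := by
        intro u; rw [List.filter_append, List.filter_singleton, Bool.cond_eq_ite]
      have hfilt_ne : ∀ u : Int, (s.2.2.1 == u) = false →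
          (l ++ [s]).filter (fun r => r.2.2.1 == u) = l.filter (fun r => r.2.2.1 == u) := by
        intro u h; rw [hfilt u, h]; simp
      have hfilt_eq : (l ++ [s]).filter (fun r => r.2.2.1 == s.2.2.1)
          = l.filter (fun r => r.2.2.1 == s.2.2.1) ++ [s] := by
        rw [hfilt s.2.2.1]; simp
      by_cases hc : st.2.contains s.2.2.1 = false
      · -- uid not seen before: filter over l at uid is empty
        have hnm : s.2.2.1 ∉ l.map (·.2.2.1) := by
          intro hm
          rw [← PySem.Set.mem_ofList, ← hk] at hm
          rw [(PySem.Dict.contains_iff_mem_keys st.2 s.2.2.1).mpr hm] at hc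
          simp at hc
        have hfe : l.filter (fun r => r.2.2.1 == s.2.2.1) = [] := by
          rw [List.filter_eq_nil_iff]
          intro r hr hb
          exact hnm (List.mem_map.mpr ⟨r, hr, by simpa using hb⟩)
        rw [pvStepA_fresh st s hc]
        refine ⟨?_, fun u => ?_, fun u => ?_⟩
        · rw [PySem.Dict.keys_insert_of_not_contains st.2 s.2.2.2.1 hc, hk,
            List.map_append, List.map_cons, List.map_nil, PySem.Set.ofList_append_singleton,
            PySem.Set.add_of_not_mem (by rw [PySem.Set.mem_ofList]; exact hnm)]
        · by_cases hu : u = s.2.2.1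
          · subst hu
            rw [PySem.Dict.get?_insert_self, hfilt_eq, hfe]
            rfl
          · have hbu : (s.2.2.1 == u) = false := by simp [Ne.symm hu]
            rw [PySem.Dict.get?_insert_of_ne st.1 s.2.2.2.2 hu, hen u, hfilt_ne u hbu]
        · by_cases hu : u = s.2.2.1
          · subst hu
            rw [PySem.Dict.get?_insert_self, hfilt_eq, hfe]
            rfl
          · have hbu : (s.2.2.1 == u) = false := by simp [Ne.symm hu]
            rw [PySem.Dict.get?_insert_of_ne st.2 s.2.2.2.1 hu, hres u, hfilt_ne u hbu]
      · -- uid seen before: the filtered list is nonempty, eventNum[uid] is its best number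
        have hc' : st.2.contains s.2.2.1 = true := by
          cases h : st.2.contains s.2.2.1 with
          | false => exact absurd h hc
          | true => rfl
        have hmem : s.2.2.1 ∈ l.map (·.2.2.1) := by
          have := (PySem.Dict.contains_iff_mem_keys st.2 s.2.2.1).mp hc'
          rw [hk, PySem.Set.mem_ofList] at this; exact this
        have hne : l.filter (fun r => r.2.2.1 == s.2.2.1) ≠ [] := by
          obtain ⟨r, hr, hru⟩ := List.mem_map.mp hmem
          intro h0
          have : r ∈ l.filter (fun r => r.2.2.1 == s.2.2.1) :=
            List.mem_filter.mpr ⟨hr, by simp [hru]⟩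
          simp [h0] at this
        obtain ⟨b, hb⟩ : ∃ b, pvBestO (l.filter (fun r => r.2.2.1 == s.2.2.1)) = some b := by
          cases hfl : l.filter (fun r => r.2.2.1 == s.2.2.1) with
          | nil => exact absurd hfl hne
          | cons h t => exact ⟨pvMaxB h t, pvBestO_cons h t⟩
        have hget : st.1.get? s.2.2.1 = some b.2.2.2.2 := by
          rw [hen s.2.2.1, hb]; rfl
        have hkeys2 : PySem.Set.ofList ((l ++ [s]).map (·.2.2.1)) = st.2.keys := by
          rw [List.map_append, List.map_cons, List.map_nil, PySem.Set.ofList_append_singleton,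
            PySem.Set.add_of_mem (by rw [PySem.Set.mem_ofList]; exact hmem), hk]
        by_cases hgt : s.2.2.2.2 > b.2.2.2.2
        · rw [pvStepA_gt st s b.2.2.2.2 hc' hget hgt]
          refine ⟨?_, fun u => ?_, fun u => ?_⟩
          · rw [PySem.Dict.keys_insert_of_contains st.2 s.2.2.2.1 hc', ← hkeys2]
          · by_cases hu : u = s.2.2.1
            · subst hu
              rw [PySem.Dict.get?_insert_self, hfilt_eq, pvBestO_append_singleton, hb]
              simp [hgt]
            · have hbu : (s.2.2.1 == u) = false := by simp [Ne.symm hu]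
              rw [PySem.Dict.get?_insert_of_ne st.1 s.2.2.2.2 hu, hen u, hfilt_ne u hbu]
          · by_cases hu : u = s.2.2.1
            · subst hu
              rw [PySem.Dict.get?_insert_self, hfilt_eq, pvBestO_append_singleton, hb]
              simp [hgt]
            · have hbu : (s.2.2.1 == u) = false := by simp [Ne.symm hu]
              rw [PySem.Dict.get?_insert_of_ne st.2 s.2.2.2.1 hu, hres u, hfilt_ne u hbu]
        · rw [pvStepA_le st s b.2.2.2.2 hc' hget hgt]
          refine ⟨?_, fun u => ?_, fun u => ?_⟩
          · rw [← hkeys2]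
          · by_cases hu : u = s.2.2.1
            · subst hu
              rw [hen s.2.2.1, hfilt_eq, pvBestO_append_singleton, hb]
              simp [hgt]
            · have hbu : (s.2.2.1 == u) = false := by simp [Ne.symm hu]
              rw [hen u, hfilt_ne u hbu]
          · by_cases hu : u = s.2.2.1
            · subst hu
              rw [hres s.2.2.1, hfilt_eq, pvBestO_append_singleton, hb]
              simp [hgt]
            · have hbu : (s.2.2.1 == u) = false := by simp [Ne.symm hu]
              rw [hres u, hfilt_ne u hbu]

-- B's groups dict: keys and per-key contents
lemma pvB_groups (rows : List PVRow) :
    (rows.foldl (fun d s => d.modify s.2.2.1 [] (fun g => g ++ [s])) PySem.Dict.empty).keys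
        = PySem.Set.ofList (rows.map (·.2.2.1))
    ∧ (∀ u : Int, (rows.foldl (fun d s => d.modify s.2.2.1 [] (fun g => g ++ [s])) PySem.Dict.empty).getD u []
        = rows.filter (fun s => s.2.2.1 == u)) := by
  constructor
  · rw [PySem.Dict.keys_foldl_modify_key rows (·.2.2.1) [] (fun _ s g => g ++ [s]) PySem.Dict.empty]
    rw [PySem.Dict.keys_empty, PySem.Set.update_nil_left]
  · intro u
    have hmap : rows.foldl (fun d s => d.modify s.2.2.1 [] (fun g => g ++ [s])) PySem.Dict.empty
        = (rows.map (fun s => (s.2.2.1, s))).foldl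
            (fun d p => d.modify p.1 [] (fun g => g ++ [p.2])) PySem.Dict.empty := by
      rw [List.foldl_map]
    rw [hmap, PySem.Dict.getD_foldl_modify_append]
    simp [List.filter_map, Function.comp_def]

-- the per-uid values of A and B agree
lemma pv_point (f : List PVRow) :
    ((pvBestO f).map (·.2.2.2.1)).getD ""
      = (match f with
         | [] => ""
         | h :: t => (pvMaxB h t).2.2.2.1) := by
  cases f with
  | nil => rfl
  | cons h t => rw [pvBestO_cons]; rfl

-- ===== VERDICT (by name: the statement is the Claim_ definition above) =====
theorem lastEventByUser_spec : Claim_equal_lastEventByUser := by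
  intro rows _
  unfold Spec_lastEventByUser lastEventByUser lastEventByUser_alt
  obtain ⟨hkA, _, hresA⟩ := pvA_inv rows
  obtain ⟨hkB, hgB⟩ := pvB_groups rows
  have hndA : (rows.foldl pvStepA (PySem.Dict.empty, PySem.Dict.empty)).2.keys.Nodup := by
    rw [hkA]; exact PySem.Set.nodup_ofList _
  have hndB : (rows.foldl (fun d s => d.modify s.2.2.1 [] (fun g => g ++ [s])) PySem.Dict.empty).keys.Nodup := by
    rw [hkB]; exact PySem.Set.nodup_ofList _
  rw [PySem.Dict.items_eq_map_keys _ hndA "", PySem.Dict.items_eq_map_keys _ hndB []]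
  rw [List.map_map, hkA, hkB]
  refine List.map_congr_left (fun u _ => ?_)
  simp only [Function.comp_def]
  rw [hgB u, PySem.Dict.getD_eq_get?_getD, hresA u]
  exact congrArg (fun v => (u, v)) (pv_point _)
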